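-- pv_equiv track=rewrite | github.com/gosch/Katas-in-python | september/maximizeNumberRoundness.py | maximizeNumberRoundness
-- ===== SOURCE A (Python) =====
-- def maximizeNumberRoundness(n):
--     st = [x for x in str(n)]
--     s = len(st)
--     j = s - 1
--     c = 0
--     for i in range(s):
--         if st[i] == '0':
--             while i < j and st[j] == '0':
--                 j -= 1
--             if i == j:
--                 return c
--             else:
--                 t = st[j]
--                 st[j] = st[i]
--                 st[i] = t
--                 c += 1
--     return c
-- ===== SOURCE B (Python) =====
-- def maximizeNumberRoundness(n):
--     s = str(n)
--     zeros = [i for i in range(len(s)) if s[i] == '0']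
--     nonzeros = [i for i in range(len(s)) if s[i] != '0']
--     return sum(1 for k in range(min(len(zeros), len(nonzeros)))
--                if zeros[k] < nonzeros[len(nonzeros) - 1 - k])
-- ===== Notes on version B (the rewrite author's own statement) =====
-- stated objective: alternative
-- what changed: Replaces A's in-place swapping scan with mutating two pointers by a non-mutating closed count: build the index lists of zeros and non-zeros once and count the positions k whose k-th leftmost zero lies before the k-th rightmost non-zero.
import Mathlib
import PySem

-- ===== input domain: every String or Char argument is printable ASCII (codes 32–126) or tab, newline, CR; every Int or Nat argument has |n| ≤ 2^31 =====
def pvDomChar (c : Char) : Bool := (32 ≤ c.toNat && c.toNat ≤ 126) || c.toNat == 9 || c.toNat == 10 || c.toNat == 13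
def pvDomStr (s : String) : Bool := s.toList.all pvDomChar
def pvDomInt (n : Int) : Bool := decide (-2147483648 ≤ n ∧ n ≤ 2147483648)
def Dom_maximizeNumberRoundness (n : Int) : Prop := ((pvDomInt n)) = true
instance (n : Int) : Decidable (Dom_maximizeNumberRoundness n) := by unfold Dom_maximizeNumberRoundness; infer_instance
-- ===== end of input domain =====

-- B replaces A's in-place swapping scan (mutable list, two moving pointers) by a
-- non-mutating count over the index lists of zeros and non-zeros (alternative decomposition, same cost).

-- ===== PORT A =====
-- inner "while i < j and st[j] == '0': j -= 1" of A; j is a decreasing in-range index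
def pvSkipA (st : List Char) (i j : Nat) : Nat :=
  if _h : i < j ∧ st.getD j ' ' = '0' then pvSkipA st i (j - 1) else j
termination_by j
decreasing_by omega

-- A's "for i in range(s)" loop over the mutable list st, with pointer j and counter c;
-- the early "return c" is the "if i = j'" branch.  All indices Python reads here are
-- in range and non-negative, so Nat indices with getD are exact.
def pvLoopA (st : List Char) (j : Nat) (c : Int) (i : Nat) : Int :=
  if _h : i < st.length then
    if st.getD i ' ' = '0' then
      let j' := pvSkipA st i j
      if i = j' then c
      else pvLoopA ((st.set j' (st.getD i ' ')).set i (st.getD j' ' ')) j' (c + 1) (i + 1)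
    else pvLoopA st j c (i + 1)
  else c
termination_by st.length - i
decreasing_by all_goals (try simp only [List.length_set]); omega

def maximizeNumberRoundness (n : Int) : Int :=
  let st := (PySem.Int.toStr n).toList
  pvLoopA st (st.length - 1) 0 0

-- ===== PORT B =====
-- [i for i in range(len(s)) if s[i] == '0']  (indices are in-range Nats)
def pvZeros (s : List Char) : List Nat :=
  (List.range s.length).filter (fun i => decide (s.getD i ' ' = '0'))

-- [i for i in range(len(s)) if s[i] != '0']
def pvNonzeros (s : List Char) : List Nat :=
  (List.range s.length).filter (fun i => decide (¬ s.getD i ' ' = '0'))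

-- sum(1 for k in range(min(len(zeros), len(nonzeros))) if zeros[k] < nonzeros[len(nonzeros)-1-k])
def pvCountB (s : List Char) : Int :=
  let zeros := pvZeros s
  let nonzeros := pvNonzeros s
  (List.range (min zeros.length nonzeros.length)).foldl
    (fun c k => if zeros.getD k 0 < nonzeros.getD (nonzeros.length - 1 - k) 0 then c + 1 else c) 0

def maximizeNumberRoundness_alt (n : Int) : Int :=
  pvCountB (PySem.Int.toStr n).toList

-- ===== PRECONDITION & SPEC =====
def Spec_maximizeNumberRoundness (n : Int) (out : Int) : Prop := out = maximizeNumberRoundness_alt n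
instance (n : Int) (out : Int) : Decidable (Spec_maximizeNumberRoundness n out) := by unfold Spec_maximizeNumberRoundness; infer_instance

-- ===== CLAIM (what is proved, stated in full; the proofs are below) =====
def Claim_equal_maximizeNumberRoundness : Prop := ∀ (n : Int), Dom_maximizeNumberRoundness n → Spec_maximizeNumberRoundness n (maximizeNumberRoundness n)

-- ===== LEMMAS AND PROOFS =====

lemma pv_getD_mem {l : List Nat} {k : Nat} (h : k < l.length) : l.getD k 0 ∈ l := by
  rw [List.getD_eq_getElem l 0 h]
  exact List.getElem_mem h

lemma mem_pvZeros {s : List Char} {p : Nat} :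
    p ∈ pvZeros s ↔ p < s.length ∧ s.getD p ' ' = '0' := by
  simp [pvZeros, List.mem_filter]

lemma mem_pvNonzeros {s : List Char} {p : Nat} :
    p ∈ pvNonzeros s ↔ p < s.length ∧ s.getD p ' ' ≠ '0' := by
  simp [pvNonzeros, List.mem_filter]

lemma pvSkipA_eq (s : List Char) (i t : Nat) :
    ∀ j, t ≤ j → (∀ p, t < p → p ≤ j → s.getD p ' ' = '0') →
      (t = i ∨ (i ≤ t ∧ s.getD t ' ' ≠ '0')) → pvSkipA s i j = t := by
  intro j
  induction j using Nat.strong_induction_on with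
  | _ j ihj =>
    intro htj hz ht
    rcases Nat.eq_or_lt_of_le htj with heq | hlt
    · subst heq
      rcases ht with rfl | ⟨hit, hne⟩
      · rw [pvSkipA, dif_neg (fun h => absurd h.1 (lt_irrefl _))]
      · rw [pvSkipA, dif_neg (fun h => hne h.2)]
    · rw [pvSkipA]
      have hj0 : s.getD j ' ' = '0' := hz j hlt le_rfl
      have hij : i < j := by rcases ht with rfl | ⟨hit, _⟩ <;> omega
      rw [dif_pos ⟨hij, hj0⟩]
      exact ihj (j-1) (by omega) (by omega) (fun p hp hp' => hz p hp (by omega)) ht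

lemma pvLoopA_unfold (st : List Char) (j : Nat) (c : Int) (i : Nat) :
    pvLoopA st j c i =
      if i < st.length then
        (if st.getD i ' ' = '0' then
          (if i = pvSkipA st i j then c
           else pvLoopA ((st.set (pvSkipA st i j) (st.getD i ' ')).set i
                  (st.getD (pvSkipA st i j) ' ')) (pvSkipA st i j) (c + 1) (i + 1))
         else pvLoopA st j c (i + 1))
      else c := by
  rw [pvLoopA]
  rfl

lemma pvLoopA_cshift (N : Nat) :
    ∀ (s : List Char) (j : Nat) (c : Int) (i : Nat), s.length - i ≤ N →
      pvLoopA s j c i = c + pvLoopA s j 0 i := by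
  induction N with
  | zero =>
    intro s j c i h
    conv_lhs => rw [pvLoopA_unfold]
    conv_rhs => rw [pvLoopA_unfold]
    have hni : ¬ i < s.length := by omega
    rw [if_neg hni, if_neg hni]; ring
  | succ N ih =>
    intro s j c i h
    conv_lhs => rw [pvLoopA_unfold]
    conv_rhs => rw [pvLoopA_unfold]
    by_cases hi : i < s.length
    · rw [if_pos hi, if_pos hi]
      by_cases h0 : s.getD i ' ' = '0'
      · rw [if_pos h0, if_pos h0]
        by_cases hij : i = pvSkipA s i j
        · rw [if_pos hij, if_pos hij]; ring
        · rw [if_neg hij, if_neg hij]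
          rw [ih _ _ (c+1) _ (by simp only [List.length_set]; omega),
              ih _ _ (0+1) _ (by simp only [List.length_set]; omega)]
          ring
      · rw [if_neg h0, if_neg h0]
        rw [ih _ _ c _ (by omega), ih _ _ (0:Int) _ (by omega)]
        try ring
    · rw [if_neg hi, if_neg hi]; ring

lemma pvLoopA_advance (N : Nat) :
    ∀ (s : List Char) (j : Nat) (c : Int) (i i' : Nat), i' - i ≤ N → i ≤ i' → i' ≤ s.length →
      (∀ p, i ≤ p → p < i' → s.getD p ' ' ≠ '0') →
      pvLoopA s j c i = pvLoopA s j c i' := by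
  induction N with
  | zero =>
    intro s j c i i' h h1 h2 h3
    have : i' = i := by omega
    rw [this]
  | succ N ih =>
    intro s j c i i' h h1 h2 h3
    by_cases heq : i = i'
    · rw [heq]
    · have hi : i < s.length := by omega
      rw [pvLoopA_unfold, if_pos hi, if_neg (h3 i le_rfl (by omega))]
      exact ih s j c (i+1) i' (by omega) (by omega) h2 (fun p hp hp' => h3 p (by omega) hp')

lemma pvLoopA_j_irrel (N : Nat) :
    ∀ (s : List Char) (i j1 j2 : Nat) (c : Int), s.length - i ≤ N →
      i ≤ j1 → j1 ≤ j2 → j2 < s.length →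
      (∀ p, j1 ≤ p → p < s.length → s.getD p ' ' = '0') →
      pvLoopA s j1 c i = pvLoopA s j2 c i := by
  induction N with
  | zero => intro s i j1 j2 c hN h1 h2 h3 h4; omega
  | succ N ih =>
    intro s i j1 j2 c hN hij1 hj12 hj2l hzsuf
    have hj1l : j1 < s.length := by omega
    have hi : i < s.length := by omega
    conv_lhs => rw [pvLoopA_unfold]
    conv_rhs => rw [pvLoopA_unfold]
    rw [if_pos hi, if_pos hi]
    by_cases h0 : s.getD i ' ' = '0'
    · rw [if_pos h0, if_pos h0]
      by_cases hex : ∃ p, i < p ∧ p < s.length ∧ s.getD p ' ' ≠ '0'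
      · obtain ⟨p, hp1, hp2, hp3⟩ := hex
        have hplt : p < j1 := by
          by_contra hc
          exact hp3 (hzsuf p (by omega) hp2)
        have hPt : i < Nat.findGreatest (fun q => i < q ∧ q < s.length ∧ s.getD q ' ' ≠ '0') j1 ∧
            Nat.findGreatest (fun q => i < q ∧ q < s.length ∧ s.getD q ' ' ≠ '0') j1 < s.length ∧
            s.getD (Nat.findGreatest (fun q => i < q ∧ q < s.length ∧ s.getD q ' ' ≠ '0') j1) ' ' ≠ '0' :=
          Nat.findGreatest_spec (P := fun q => i < q ∧ q < s.length ∧ s.getD q ' ' ≠ '0')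
            (m := p) (n := j1) (by omega) ⟨hp1, hp2, hp3⟩
        have htle : Nat.findGreatest (fun q => i < q ∧ q < s.length ∧ s.getD q ' ' ≠ '0') j1 ≤ j1 :=
          Nat.findGreatest_le j1
        have hzabove : ∀ q, Nat.findGreatest (fun q => i < q ∧ q < s.length ∧ s.getD q ' ' ≠ '0') j1 < q →
            q ≤ j2 → s.getD q ' ' = '0' := by
          intro q hq1 hq2
          by_cases hqj1 : q ≤ j1
          · by_contra hc
            exact Nat.findGreatest_is_greatest
              (P := fun q => i < q ∧ q < s.length ∧ s.getD q ' ' ≠ '0') hq1 hqj1 ⟨by omega, by omega, hc⟩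
          · exact hzsuf q (by omega) (by omega)
        set t := Nat.findGreatest (fun q => i < q ∧ q < s.length ∧ s.getD q ' ' ≠ '0') j1 with ht
        have hs1 : pvSkipA s i j1 = t :=
          pvSkipA_eq s i t j1 htle (fun q hq1 hq2 => hzabove q hq1 (by omega))
            (Or.inr ⟨by omega, hPt.2.2⟩)
        have hs2 : pvSkipA s i j2 = t :=
          pvSkipA_eq s i t j2 (by omega) (fun q hq1 hq2 => hzabove q hq1 hq2)
            (Or.inr ⟨by omega, hPt.2.2⟩)
        rw [hs1, hs2]
      · push Not at hex
        have hs1 : pvSkipA s i j1 = i :=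
          pvSkipA_eq s i i j1 hij1 (fun q hq1 hq2 => hex q hq1 (by omega)) (Or.inl rfl)
        have hs2 : pvSkipA s i j2 = i :=
          pvSkipA_eq s i i j2 (by omega) (fun q hq1 hq2 => hex q hq1 (by omega)) (Or.inl rfl)
        rw [hs1, hs2]
    · rw [if_neg h0, if_neg h0]
      have hij1' : i ≠ j1 := by
        intro hc
        exact h0 (hc ▸ hzsuf j1 le_rfl hj1l)
      exact ih s (i+1) j1 j2 c (by omega) (by omega) hj12 hj2l hzsuf

def pvSw (s : List Char) (z0 m : Nat) : List Char :=
  (s.set m (s.getD z0 ' ')).set z0 (s.getD m ' ')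

lemma pvSw_getD (s : List Char) (z0 m : Nat) (hz0l : z0 < s.length) (hml : m < s.length)
    (hne : z0 ≠ m) (p : Nat) :
    (pvSw s z0 m).getD p ' ' =
      if p = z0 then s.getD m ' ' else if p = m then s.getD z0 ' ' else s.getD p ' ' := by
  simp only [pvSw, List.getD_eq_getElem?_getD, List.getElem?_set, List.length_set]
  by_cases h1 : p = z0
  · subst h1
    rw [if_pos rfl, if_pos hz0l]
    simp
  · rw [if_neg (fun h => h1 h.symm)]
    by_cases h2 : p = m
    · subst h2
      rw [if_neg h1, if_pos rfl, if_pos hml, if_pos rfl]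
      simp
    · rw [if_neg (fun h => h2 h.symm), if_neg h1, if_neg h2]

lemma pvSw_length (s : List Char) (z0 m : Nat) : (pvSw s z0 m).length = s.length := by
  simp [pvSw]

lemma pvRange_split2 (n a b : Nat) (hab : a < b) (hbn : b < n) :
    List.range n =
      List.range a ++ a :: (List.range' (a + 1) (b - (a + 1)) ++
        b :: List.range' (b + 1) (n - (b + 1))) := by
  have h2 : (b : Nat) :: List.range' (b+1) (n-(b+1)) = List.range' b (n - b) := by
    rw [show n - b = (n-(b+1)) + 1 from by omega, List.range'_succ]
  have h1 : (a : Nat) :: (List.range' (a+1) (b-(a+1)) ++ List.range' b (n - b))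
      = List.range' a (n - a) := by
    rw [show n - a = ((b-(a+1)) + (n - b)) + 1 from by omega, List.range'_succ]
    congr 1
    have := List.range'_append_1 (s := a+1) (m := b-(a+1)) (n := n-b)
    rw [show a + 1 + (b - (a+1)) = b from by omega] at this
    exact this
  rw [← List.cons_append, h2, List.cons_append] at *
  rw [h1]
  rw [List.range_eq_range']
  have := List.range'_append_1 (s := 0) (m := a) (n := n - a)
  rw [show (0:Nat) + a = a from by omega, show a + (n - a) = n from by omega] at this
  rw [← this, List.range_eq_range']

def pvMu (s : List Char) : Nat :=
  (List.range s.length).countP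
    (fun p => decide (s.getD p ' ' = '0' ∧ ∃ q, q < s.length ∧ p < q ∧ s.getD q ' ' ≠ '0'))

lemma pvMu_swap_lt (s : List Char) (z0 m : Nat)
    (hz0l : z0 < s.length) (hz0 : s.getD z0 ' ' = '0')
    (hml : m < s.length) (hm : s.getD m ' ' ≠ '0')
    (hmmax : ∀ p, m < p → p < s.length → s.getD p ' ' = '0')
    (hlt : z0 < m) :
    pvMu (pvSw s z0 m) < pvMu s := by
  have hsw := pvSw_getD s z0 m hz0l hml (by omega)
  have hlen : (pvSw s z0 m).length = s.length := pvSw_length s z0 m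
  -- pointwise implication
  have hpoint : ∀ p : Nat, p ≠ z0 →
      (decide ((pvSw s z0 m).getD p ' ' = '0' ∧
        ∃ q, q < s.length ∧ p < q ∧ (pvSw s z0 m).getD q ' ' ≠ '0') = true) →
      (decide (s.getD p ' ' = '0' ∧
        ∃ q, q < s.length ∧ p < q ∧ s.getD q ' ' ≠ '0') = true) := by
    intro p hpz hp
    rw [decide_eq_true_iff] at hp ⊢
    obtain ⟨hp0, q, hq, hpq, hq0⟩ := hp
    rw [hsw p, if_neg hpz] at hp0
    by_cases hpm : p = m
    · exfalso
      rw [hsw q] at hq0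
      have hqz : q ≠ z0 := by omega
      have hqm : q ≠ m := by omega
      rw [if_neg hqz, if_neg hqm] at hq0
      exact hq0 (hmmax q (by omega) hq)
    · rw [if_neg hpm] at hp0
      refine ⟨hp0, ?_⟩
      rw [hsw q] at hq0
      by_cases hqz : q = z0
      · exact ⟨m, by omega, by omega, hm⟩
      · rw [if_neg hqz] at hq0
        by_cases hqm : q = m
        · exfalso; rw [if_pos hqm] at hq0; exact hq0 hz0
        · rw [if_neg hqm] at hq0
          exact ⟨q, hq, hpq, hq0⟩
  -- split the range at z0
  have hsplit : List.range s.length =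
      List.range z0 ++ z0 :: List.range' (z0 + 1) (s.length - (z0 + 1)) := by
    have h1 : (z0 : Nat) :: List.range' (z0+1) (s.length-(z0+1)) = List.range' z0 (s.length - z0) := by
      rw [show s.length - z0 = (s.length-(z0+1)) + 1 from by omega, List.range'_succ]
    rw [h1, List.range_eq_range']
    have := List.range'_append_1 (s := 0) (m := z0) (n := s.length - z0)
    rw [show (0:Nat) + z0 = z0 from by omega, show z0 + (s.length - z0) = s.length from by omega] at this
    rw [← this, List.range_eq_range']
  have h3 : (decide ((pvSw s z0 m).getD z0 ' ' = '0' ∧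
      ∃ q, q < s.length ∧ z0 < q ∧ (pvSw s z0 m).getD q ' ' ≠ '0')) = false := by
    rw [decide_eq_false_iff_not]
    rintro ⟨h0, -⟩
    rw [hsw z0, if_pos rfl] at h0
    exact hm h0
  have h4 : (decide (s.getD z0 ' ' = '0' ∧
      ∃ q, q < s.length ∧ z0 < q ∧ s.getD q ' ' ≠ '0')) = true := by
    rw [decide_eq_true_iff]
    exact ⟨hz0, m, by omega, hlt, hm⟩
  have h1 : (List.range z0).countP
        (fun p => decide ((pvSw s z0 m).getD p ' ' = '0' ∧
          ∃ q, q < s.length ∧ p < q ∧ (pvSw s z0 m).getD q ' ' ≠ '0')) ≤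
      (List.range z0).countP
        (fun p => decide (s.getD p ' ' = '0' ∧
          ∃ q, q < s.length ∧ p < q ∧ s.getD q ' ' ≠ '0')) :=
    List.countP_mono_left (fun a ha h => hpoint a (by rw [List.mem_range] at ha; omega) h)
  have h2 : (List.range' (z0 + 1) (s.length - (z0 + 1))).countP
        (fun p => decide ((pvSw s z0 m).getD p ' ' = '0' ∧
          ∃ q, q < s.length ∧ p < q ∧ (pvSw s z0 m).getD q ' ' ≠ '0')) ≤
      (List.range' (z0 + 1) (s.length - (z0 + 1))).countP
        (fun p => decide (s.getD p ' ' = '0' ∧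
          ∃ q, q < s.length ∧ p < q ∧ s.getD q ' ' ≠ '0')) :=
    List.countP_mono_left (fun a ha h => hpoint a (by
      rw [List.mem_range'_1] at ha; omega) h)
  unfold pvMu
  rw [hlen, hsplit, List.countP_append, List.countP_append, List.countP_cons, List.countP_cons,
    h3, h4]
  simp only [if_false, if_true, Bool.false_eq_true]
  omega

lemma pvCount_core (A1 F G A3 : List Nat) (z0 m : Nat)
    (hA1len : A1.length = z0)
    (hA1mem : ∀ x ∈ A1, x < z0)
    (hFmem : ∀ x ∈ F, z0 < x ∧ x < m)
    (hGmem : ∀ x ∈ G, z0 < x ∧ x < m)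
    (hA3mem : ∀ x ∈ A3, m < x)
    (hz0m : z0 < m) :
    (List.range (min ((z0 :: (F ++ A3)).length) ((A1 ++ (G ++ [m])).length))).countP
      (fun k => decide ((z0 :: (F ++ A3)).getD k 0 <
        (A1 ++ (G ++ [m])).getD ((A1 ++ (G ++ [m])).length - 1 - k) 0)) =
    (List.range (min ((F ++ (m :: A3)).length) ((A1 ++ (z0 :: G)).length))).countP
      (fun k => decide ((F ++ (m :: A3)).getD k 0 <
        (A1 ++ (z0 :: G)).getD ((A1 ++ (z0 :: G)).length - 1 - k) 0)) + 1 := by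
  have hlen1 : (z0 :: (F ++ A3)).length = F.length + A3.length + 1 := by
    simp only [List.length_cons, List.length_append]
  have hlen2 : (A1 ++ (G ++ [m])).length = z0 + G.length + 1 := by
    simp only [List.length_append, List.length_cons, List.length_nil, hA1len]; omega
  have hlen3 : (F ++ (m :: A3)).length = F.length + A3.length + 1 := by
    simp only [List.length_append, List.length_cons]; omega
  have hlen4 : (A1 ++ (z0 :: G)).length = z0 + G.length + 1 := by
    simp only [List.length_append, List.length_cons, hA1len]; omega
  rw [hlen1, hlen2, hlen3, hlen4]
  set mn := min (F.length + A3.length + 1) (z0 + G.length + 1) with hmn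
  have hmn1 : 1 ≤ mn := by omega
  have LA1 : A1.length = z0 := hA1len
  have LAG : (A1 ++ G).length = z0 + G.length := by
    simp only [List.length_append, LA1]
  -- the first pair (leftmost zero z0, rightmost non-zero m) always counts
  have h0 : (decide ((z0 :: (F ++ A3)).getD 0 0 <
      (A1 ++ (G ++ [m])).getD (z0 + G.length + 1 - 1 - 0) 0)) = true := by
    rw [List.getD_cons_zero]
    rw [show (A1 ++ (G ++ [m])) = (A1 ++ G) ++ [m] from by rw [List.append_assoc]]
    rw [List.getD_append_right (A1 ++ G) [m] 0 _ (by rw [LAG]; omega)]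
    rw [show z0 + G.length + 1 - 1 - 0 - (A1 ++ G).length = 0 from by rw [LAG]; omega]
    rw [List.getD_cons_zero]
    simpa using hz0m
  -- shifted terms agree
  have hshift : ∀ k, k < mn - 1 →
      (decide ((z0 :: (F ++ A3)).getD (k + 1) 0 <
        (A1 ++ (G ++ [m])).getD (z0 + G.length + 1 - 1 - (k + 1)) 0)) =
      (decide ((F ++ (m :: A3)).getD k 0 <
        (A1 ++ (z0 :: G)).getD (z0 + G.length + 1 - 1 - k) 0)) := by
    intro k hk
    have hk1 : k < F.length + A3.length := by omega
    have hk2 : k < z0 + G.length := by omega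
    rw [List.getD_cons_succ]
    rw [show z0 + G.length + 1 - 1 - (k + 1) = z0 + G.length - 1 - k from by omega]
    rw [show (A1 ++ (G ++ [m])) = (A1 ++ G) ++ [m] from by rw [List.append_assoc]]
    rw [List.getD_append (A1 ++ G) [m] 0 _ (by rw [LAG]; omega)]
    rw [show z0 + G.length + 1 - 1 - k = z0 + G.length - k from by omega]
    by_cases hka : k < F.length
    · by_cases hkg : k < G.length
      · -- identical entries on both sides
        rw [List.getD_append F A3 0 k hka,
            List.getD_append F (m :: A3) 0 k hka]
        rw [List.getD_append_right A1 G 0 _ (by rw [LA1]; omega),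
            List.getD_append_right A1 (z0 :: G) 0 _ (by rw [LA1]; omega)]
        rw [show z0 + G.length - 1 - k - A1.length = G.length - 1 - k from by rw [LA1]; omega]
        rw [show z0 + G.length - k - A1.length = (G.length - 1 - k) + 1 from by rw [LA1]; omega]
        rw [List.getD_cons_succ]
      · -- k ≥ len G : the non-zero side entry is in A1 (or is z0); both sides false
        have hx1 : z0 < (F ++ A3).getD k 0 := by
          have hmem := pv_getD_mem (l := F ++ A3) (k := k)
            (by simp only [List.length_append]; omega)
          rcases List.mem_append.mp hmem with h | h
          · exact (hFmem _ h).1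
          · exact lt_trans hz0m (hA3mem _ h)
        have hx2 : z0 < (F ++ (m :: A3)).getD k 0 := by
          have hmem := pv_getD_mem (l := F ++ (m :: A3)) (k := k)
            (by simp only [List.length_append, List.length_cons]; omega)
          rcases List.mem_append.mp hmem with h | h
          · exact (hFmem _ h).1
          · rcases List.mem_cons.mp h with h | h
            · omega
            · exact lt_trans hz0m (hA3mem _ h)
        have hy1 : (A1 ++ G).getD (z0 + G.length - 1 - k) 0 < z0 := by
          rw [List.getD_append A1 G 0 _ (by rw [LA1]; omega)]
          exact hA1mem _ (pv_getD_mem (by rw [LA1]; omega))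
        have hy2 : (A1 ++ (z0 :: G)).getD (z0 + G.length - k) 0 ≤ z0 := by
          by_cases hkeg : k = G.length
          · rw [List.getD_append_right A1 (z0 :: G) 0 _ (by rw [LA1]; omega),
              show z0 + G.length - k - A1.length = 0 from by rw [LA1]; omega,
              List.getD_cons_zero]
          · rw [List.getD_append A1 (z0 :: G) 0 _ (by rw [LA1]; omega)]
            exact le_of_lt (hA1mem _ (pv_getD_mem (by rw [LA1]; omega)))
        rw [decide_eq_false (show ¬((F ++ A3).getD k 0 <
            (A1 ++ G).getD (z0 + G.length - 1 - k) 0) from by omega),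
          decide_eq_false (show ¬((F ++ (m :: A3)).getD k 0 <
            (A1 ++ (z0 :: G)).getD (z0 + G.length - k) 0) from by omega)]
    · -- k ≥ len F : the zero side entry is m or beyond; both sides false
      have hx1 : m < (F ++ A3).getD k 0 := by
        rw [List.getD_append_right F A3 0 k (by omega)]
        exact hA3mem _ (pv_getD_mem (by omega))
      have hx2 : m ≤ (F ++ (m :: A3)).getD k 0 := by
        rw [List.getD_append_right F (m :: A3) 0 k (by omega)]
        have hmem := pv_getD_mem (l := m :: A3) (k := k - F.length)
          (by simp only [List.length_cons]; omega)
        rcases List.mem_cons.mp hmem with h | h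
        · omega
        · have := hA3mem _ h; omega
      have hy1 : (A1 ++ G).getD (z0 + G.length - 1 - k) 0 < m := by
        have hmem := pv_getD_mem (l := A1 ++ G) (k := z0 + G.length - 1 - k)
          (by rw [LAG]; omega)
        rcases List.mem_append.mp hmem with h | h
        · exact lt_trans (hA1mem _ h) hz0m
        · exact (hGmem _ h).2
      have hy2 : (A1 ++ (z0 :: G)).getD (z0 + G.length - k) 0 < m := by
        have hmem := pv_getD_mem (l := A1 ++ (z0 :: G)) (k := z0 + G.length - k)
          (by rw [hlen4]; omega)
        rcases List.mem_append.mp hmem with h | h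
        · exact lt_trans (hA1mem _ h) hz0m
        · rcases List.mem_cons.mp h with h | h
          · omega
          · exact (hGmem _ h).2
      rw [decide_eq_false (show ¬((F ++ A3).getD k 0 <
          (A1 ++ G).getD (z0 + G.length - 1 - k) 0) from by omega),
        decide_eq_false (show ¬((F ++ (m :: A3)).getD k 0 <
          (A1 ++ (z0 :: G)).getD (z0 + G.length - k) 0) from by omega)]
  -- the extra last term on the right-hand side is false
  have hlast : (decide ((F ++ (m :: A3)).getD (mn - 1) 0 <
      (A1 ++ (z0 :: G)).getD (z0 + G.length + 1 - 1 - (mn - 1)) 0)) = false := by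
    by_cases hc : F.length + A3.length + 1 ≤ z0 + G.length + 1
    · have hmneq : mn - 1 = F.length + A3.length := by omega
      have hx2 : m ≤ (F ++ (m :: A3)).getD (mn - 1) 0 := by
        rw [List.getD_append_right F (m :: A3) 0 _ (by omega)]
        have hmem := pv_getD_mem (l := m :: A3) (k := mn - 1 - F.length)
          (by simp only [List.length_cons]; omega)
        rcases List.mem_cons.mp hmem with h | h
        · omega
        · have := hA3mem _ h; omega
      have hy2 : (A1 ++ (z0 :: G)).getD (z0 + G.length + 1 - 1 - (mn - 1)) 0 < m := by
        have hidx := pv_getD_mem (l := A1 ++ (z0 :: G))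
          (k := z0 + G.length + 1 - 1 - (mn - 1)) (by rw [hlen4]; omega)
        rcases List.mem_append.mp hidx with h | h
        · exact lt_trans (hA1mem _ h) hz0m
        · rcases List.mem_cons.mp h with h | h
          · omega
          · exact (hGmem _ h).2
      rw [decide_eq_false (show ¬((F ++ (m :: A3)).getD (mn - 1) 0 <
          (A1 ++ (z0 :: G)).getD (z0 + G.length + 1 - 1 - (mn - 1)) 0) from by omega)]
    · have hmneq : mn - 1 = z0 + G.length := by omega
      have hx2 : z0 < (F ++ (m :: A3)).getD (mn - 1) 0 := by
        have hmem := pv_getD_mem (l := F ++ (m :: A3)) (k := mn - 1) (by rw [hlen3]; omega)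
        rcases List.mem_append.mp hmem with h | h
        · exact (hFmem _ h).1
        · rcases List.mem_cons.mp h with h | h
          · omega
          · exact lt_trans hz0m (hA3mem _ h)
      have hy2 : (A1 ++ (z0 :: G)).getD (z0 + G.length + 1 - 1 - (mn - 1)) 0 ≤ z0 := by
        rw [hmneq, show z0 + G.length + 1 - 1 - (z0 + G.length) = 0 from by omega]
        by_cases hz00 : z0 = 0
        · have hA1nil : A1 = [] := List.eq_nil_of_length_eq_zero (by omega)
          rw [hA1nil, List.nil_append, List.getD_cons_zero]
        · rw [List.getD_append A1 (z0 :: G) 0 0 (by rw [LA1]; omega)]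
          exact le_of_lt (hA1mem _ (pv_getD_mem (by rw [LA1]; omega)))
      rw [decide_eq_false (show ¬((F ++ (m :: A3)).getD (mn - 1) 0 <
          (A1 ++ (z0 :: G)).getD (z0 + G.length + 1 - 1 - (mn - 1)) 0) from by omega)]
  -- assemble
  obtain ⟨mn', hmn'⟩ : ∃ k, mn = k + 1 := ⟨mn - 1, by omega⟩
  have hmn'e : mn - 1 = mn' := by omega
  rw [hmn'e] at hlast
  rw [hmn']
  conv_lhs => rw [List.range_succ_eq_map]
  conv_rhs => rw [List.range_succ]
  rw [List.countP_cons, List.countP_map, List.countP_append, List.countP_singleton]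
  have hmid : (List.range mn').countP
      ((fun k => decide ((z0 :: (F ++ A3)).getD k 0 <
        (A1 ++ (G ++ [m])).getD (z0 + G.length + 1 - 1 - k) 0)) ∘ Nat.succ) =
      (List.range mn').countP (fun k => decide ((F ++ (m :: A3)).getD k 0 <
        (A1 ++ (z0 :: G)).getD (z0 + G.length + 1 - 1 - k) 0)) := by
    refine List.countP_congr ?_
    intro k hk
    rw [List.mem_range] at hk
    have hs := hshift k (by omega)
    simp only [Function.comp_apply, Nat.succ_eq_add_one]
    rw [hs]
  rw [hmid]
  simp only [h0, hlast, if_true, Bool.false_eq_true, if_false]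

lemma pvFold_eq_countP (Z NZ : List Nat) :
    (List.range (min Z.length NZ.length)).foldl
      (fun c k => if Z.getD k 0 < NZ.getD (NZ.length - 1 - k) 0 then c + 1 else c) (0 : Int)
    = ((List.range (min Z.length NZ.length)).countP
        (fun k => decide (Z.getD k 0 < NZ.getD (NZ.length - 1 - k) 0)) : Nat) := by
  rw [PySem.List.foldl_ite_add_one]
  simp

lemma pvCountB_swap (s : List Char) (z0 m : Nat)
    (hz0l : z0 < s.length) (hz0 : s.getD z0 ' ' = '0') (hz0min : ∀ p, p < z0 → s.getD p ' ' ≠ '0')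
    (hml : m < s.length) (hm : s.getD m ' ' ≠ '0')
    (hmmax : ∀ p, m < p → p < s.length → s.getD p ' ' = '0')
    (hlt : z0 < m) :
    pvCountB s = 1 + pvCountB (pvSw s z0 m) := by
  have hsw := pvSw_getD s z0 m hz0l hml (by omega)
  have hlen : (pvSw s z0 m).length = s.length := pvSw_length s z0 m
  have hMmem : ∀ x ∈ List.range' (z0 + 1) (m - (z0 + 1)), z0 < x ∧ x < m := by
    intro x hx
    rw [List.mem_range'_1] at hx
    omega
  have hA3mem' : ∀ x ∈ List.range' (m + 1) (s.length - (m + 1)), m < x := by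
    intro x hx
    rw [List.mem_range'_1] at hx
    omega
  -- decompositions of the four index lists
  have hZ : pvZeros s =
      z0 :: ((List.range' (z0 + 1) (m - (z0 + 1))).filter (fun i => decide (s.getD i ' ' = '0')) ++
        List.range' (m + 1) (s.length - (m + 1))) := by
    unfold pvZeros
    rw [pvRange_split2 s.length z0 m hlt hml]
    rw [List.filter_append, List.filter_cons, List.filter_append, List.filter_cons]
    rw [(List.filter_eq_nil_iff (l := List.range z0)).mpr (fun x hx => by
      rw [List.mem_range] at hx
      simp only [decide_eq_true_eq]
      exact hz0min x hx)]
    rw [if_pos (decide_eq_true hz0)]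
    rw [if_neg (by simp only [decide_eq_true_eq]; exact hm)]
    rw [(List.filter_eq_self (l := List.range' (m + 1) (s.length - (m + 1)))).mpr (fun x hx =>
      decide_eq_true (hmmax x (hA3mem' x hx) (by rw [List.mem_range'_1] at hx; omega)))]
    simp
  have hNZ : pvNonzeros s =
      List.range z0 ++
        ((List.range' (z0 + 1) (m - (z0 + 1))).filter (fun i => decide (¬ s.getD i ' ' = '0')) ++
          [m]) := by
    unfold pvNonzeros
    rw [pvRange_split2 s.length z0 m hlt hml]
    rw [List.filter_append, List.filter_cons, List.filter_append, List.filter_cons]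
    rw [(List.filter_eq_self (l := List.range z0)).mpr (fun x hx => by
      rw [List.mem_range] at hx
      exact decide_eq_true (hz0min x hx))]
    rw [if_neg (by simp only [decide_eq_true_eq]; exact fun h => h hz0)]
    rw [if_pos (decide_eq_true hm)]
    rw [(List.filter_eq_nil_iff (l := List.range' (m + 1) (s.length - (m + 1)))).mpr
      (fun x hx => by
        simp only [decide_eq_true_eq]
        exact fun h => h (hmmax x (hA3mem' x hx) (by rw [List.mem_range'_1] at hx; omega)))]
  have hZ' : pvZeros (pvSw s z0 m) =
      (List.range' (z0 + 1) (m - (z0 + 1))).filter (fun i => decide (s.getD i ' ' = '0')) ++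
        (m :: List.range' (m + 1) (s.length - (m + 1))) := by
    unfold pvZeros
    rw [hlen, pvRange_split2 s.length z0 m hlt hml]
    rw [List.filter_append, List.filter_cons, List.filter_append, List.filter_cons]
    rw [(List.filter_eq_nil_iff (l := List.range z0)).mpr (fun x hx => by
      rw [List.mem_range] at hx
      simp only [decide_eq_true_eq]
      rw [hsw x, if_neg (by omega), if_neg (by omega)]
      exact hz0min x hx)]
    rw [if_neg (by
      simp only [decide_eq_true_eq]
      rw [hsw z0, if_pos rfl]
      exact hm)]
    rw [if_pos (by
      refine decide_eq_true ?_
      rw [hsw m, if_neg (by omega), if_pos rfl]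
      exact hz0)]
    rw [List.filter_congr (q := fun i => decide (s.getD i ' ' = '0')) (fun x hx => by
      have h := hMmem x hx
      show decide ((pvSw s z0 m).getD x ' ' = '0') = decide (s.getD x ' ' = '0')
      rw [hsw x, if_neg (by omega), if_neg (by omega)])]
    rw [(List.filter_eq_self (l := List.range' (m + 1) (s.length - (m + 1)))).mpr
      (fun x hx => by
        have h := hA3mem' x hx
        refine decide_eq_true ?_
        rw [hsw x, if_neg (by omega), if_neg (by omega)]
        exact hmmax x h (by rw [List.mem_range'_1] at hx; omega))]
    simp
  have hNZ' : pvNonzeros (pvSw s z0 m) =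
      List.range z0 ++
        (z0 :: (List.range' (z0 + 1) (m - (z0 + 1))).filter
          (fun i => decide (¬ s.getD i ' ' = '0'))) := by
    unfold pvNonzeros
    rw [hlen, pvRange_split2 s.length z0 m hlt hml]
    rw [List.filter_append, List.filter_cons, List.filter_append, List.filter_cons]
    rw [(List.filter_eq_self (l := List.range z0)).mpr (fun x hx => by
      rw [List.mem_range] at hx
      refine decide_eq_true ?_
      rw [hsw x, if_neg (by omega), if_neg (by omega)]
      exact hz0min x hx)]
    rw [if_pos (by
      refine decide_eq_true ?_
      rw [hsw z0, if_pos rfl]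
      exact hm)]
    rw [if_neg (by
      simp only [decide_eq_true_eq]
      rw [hsw m, if_neg (by omega), if_pos rfl]
      exact fun h => h hz0)]
    rw [List.filter_congr (q := fun i => decide (¬ s.getD i ' ' = '0')) (fun x hx => by
      have h := hMmem x hx
      show decide (¬ (pvSw s z0 m).getD x ' ' = '0') = decide (¬ s.getD x ' ' = '0')
      rw [hsw x, if_neg (by omega), if_neg (by omega)])]
    rw [(List.filter_eq_nil_iff (l := List.range' (m + 1) (s.length - (m + 1)))).mpr
      (fun x hx => by
        have h := hA3mem' x hx
        simp only [decide_eq_true_eq]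
        rw [hsw x, if_neg (by omega), if_neg (by omega)]
        exact fun hne => hne (hmmax x h (by rw [List.mem_range'_1] at hx; omega)))]
    simp
  -- turn both sides into countP form and apply the core counting lemma
  unfold pvCountB
  rw [pvFold_eq_countP, pvFold_eq_countP]
  rw [hZ, hNZ, hZ', hNZ']
  have hcore := pvCount_core (List.range z0)
    ((List.range' (z0 + 1) (m - (z0 + 1))).filter (fun i => decide (s.getD i ' ' = '0')))
    ((List.range' (z0 + 1) (m - (z0 + 1))).filter (fun i => decide (¬ s.getD i ' ' = '0')))
    (List.range' (m + 1) (s.length - (m + 1))) z0 m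
    (List.length_range)
    (fun x hx => List.mem_range.mp hx)
    (fun x hx => hMmem x (List.mem_of_mem_filter hx))
    (fun x hx => hMmem x (List.mem_of_mem_filter hx))
    hA3mem'
    hlt
  omega

lemma pvMain_step (s : List Char)
    (ih : ∀ s₂, pvMu s₂ < pvMu s → pvLoopA s₂ (s₂.length - 1) 0 0 = pvCountB s₂) :
    pvLoopA s (s.length - 1) 0 0 = pvCountB s := by
  by_cases hz : ∃ p, p < s.length ∧ s.getD p ' ' = '0'
  · have hz0l : Nat.find hz < s.length := (Nat.find_spec hz).1
    have hz0eq : s.getD (Nat.find hz) ' ' = '0' := (Nat.find_spec hz).2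
    have hz0min : ∀ p, p < Nat.find hz → s.getD p ' ' ≠ '0' := by
      intro p hp hc
      exact Nat.find_min hz hp ⟨by omega, hc⟩
    by_cases hnz : ∃ p, p < s.length ∧ s.getD p ' ' ≠ '0'
    · obtain ⟨p0, hp0l, hp0⟩ := hnz
      have hlen0 : 0 < s.length := by omega
      have hmspec : s.getD (Nat.findGreatest (fun p => s.getD p ' ' ≠ '0') (s.length - 1)) ' '
          ≠ '0' :=
        Nat.findGreatest_spec (P := fun p => s.getD p ' ' ≠ '0') (m := p0) (n := s.length - 1) (by omega) hp0
      have hmle : Nat.findGreatest (fun p => s.getD p ' ' ≠ '0') (s.length - 1) ≤ s.length - 1 :=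
        Nat.findGreatest_le _
      have hmmax : ∀ p, Nat.findGreatest (fun p => s.getD p ' ' ≠ '0') (s.length - 1) < p →
          p < s.length → s.getD p ' ' = '0' := by
        intro p h1 h2
        by_contra hc
        exact Nat.findGreatest_is_greatest h1 (by omega) hc
      set m := Nat.findGreatest (fun p => s.getD p ' ' ≠ '0') (s.length - 1) with hmdef
      set z0 := Nat.find hz with hz0def
      have hml : m < s.length := by omega
      have hne : z0 ≠ m := fun h => hmspec (h ▸ hz0eq)
      rcases lt_or_gt_of_ne hne with hlt | hgt
      · -- z0 < m : one swap happens, then recurse on the swapped list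
        have hsw := pvSw_getD s z0 m hz0l hml hne
        have hlen' : (pvSw s z0 m).length = s.length := pvSw_length s z0 m
        have hadv : pvLoopA s (s.length - 1) 0 0 = pvLoopA s (s.length - 1) 0 z0 :=
          pvLoopA_advance s.length s (s.length - 1) 0 0 z0 (by omega) (by omega) (by omega)
            (fun p hp hp' => hz0min p hp')
        have hskip : pvSkipA s z0 (s.length - 1) = m :=
          pvSkipA_eq s z0 m (s.length - 1) (by omega)
            (fun p h1 h2 => hmmax p h1 (by omega)) (Or.inr ⟨by omega, hmspec⟩)
        rw [hadv, pvLoopA_unfold, if_pos hz0l, if_pos hz0eq, hskip, if_neg hne]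
        show pvLoopA (pvSw s z0 m) m (0 + 1) (z0 + 1) = pvCountB s
        rw [pvLoopA_cshift (pvSw s z0 m).length (pvSw s z0 m) m (0 + 1) (z0 + 1) (by omega)]
        rw [pvLoopA_j_irrel (pvSw s z0 m).length (pvSw s z0 m) (z0 + 1) m (s.length - 1) 0
          (by omega) (by omega) (by omega) (by omega)
          (fun p h1 h2 => by
            rw [hsw p]
            by_cases hpz : p = z0
            · omega
            · rw [if_neg hpz]
              by_cases hpm : p = m
              · rw [if_pos hpm]; exact hz0eq
              · rw [if_neg hpm]
                exact hmmax p (by omega) (by rw [hlen'] at h2; exact h2))]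
        rw [← pvLoopA_advance (pvSw s z0 m).length (pvSw s z0 m) (s.length - 1) 0 0 (z0 + 1)
          (by omega) (by omega) (by omega)
          (fun p hp hp' => by
            rw [hsw p]
            by_cases hpz : p = z0
            · rw [if_pos hpz]; exact hmspec
            · rw [if_neg hpz, if_neg (by omega)]
              exact hz0min p (by omega))]
        rw [show s.length - 1 = (pvSw s z0 m).length - 1 from by rw [hlen']]
        rw [ih (pvSw s z0 m) (pvMu_swap_lt s z0 m hz0l hz0eq hml hmspec hmmax hlt)]
        rw [pvCountB_swap s z0 m hz0l hz0eq hz0min hml hmspec hmmax hlt]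
        omega
      · -- m < z0 : everything from z0 on is zero; no swap is possible, both count 0
        have hadv : pvLoopA s (s.length - 1) 0 0 = pvLoopA s (s.length - 1) 0 z0 :=
          pvLoopA_advance s.length s (s.length - 1) 0 0 z0 (by omega) (by omega) (by omega)
            (fun p hp hp' => hz0min p hp')
        have hskip : pvSkipA s z0 (s.length - 1) = z0 :=
          pvSkipA_eq s z0 z0 (s.length - 1) (by omega)
            (fun p h1 h2 => hmmax p (by omega) (by omega)) (Or.inl rfl)
        rw [hadv, pvLoopA_unfold, if_pos hz0l, if_pos hz0eq, hskip, if_pos rfl]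
        unfold pvCountB
        rw [pvFold_eq_countP]
        rw [List.countP_eq_zero.mpr (fun k hk => by
          rw [List.mem_range] at hk
          simp only [decide_eq_true_eq]
          have hkZ : k < (pvZeros s).length := by omega
          have hkN : (pvNonzeros s).length - 1 - k < (pvNonzeros s).length := by omega
          have hx := mem_pvZeros.mp (pv_getD_mem hkZ)
          have hy := mem_pvNonzeros.mp (pv_getD_mem hkN)
          have hxz : z0 ≤ (pvZeros s).getD k 0 := by
            by_contra hc
            exact hz0min _ (by omega) hx.2
          have hym : (pvNonzeros s).getD ((pvNonzeros s).length - 1 - k) 0 ≤ m := by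
            by_contra hc
            exact hy.2 (hmmax _ (by omega) hy.1)
          omega)]
        simp
    · push Not at hnz
      have hlen0 : 0 < s.length := by omega
      have hz00 : s.getD 0 ' ' = '0' := hnz 0 hlen0
      have hskip : pvSkipA s 0 (s.length - 1) = 0 :=
        pvSkipA_eq s 0 0 (s.length - 1) (by omega)
          (fun p h1 h2 => hnz p (by omega)) (Or.inl rfl)
      rw [pvLoopA_unfold, if_pos hlen0, if_pos hz00, hskip, if_pos rfl]
      have hNZnil : pvNonzeros s = [] :=
        (List.filter_eq_nil_iff (l := List.range s.length)).mpr (fun x hx => by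
          rw [List.mem_range] at hx
          simp only [decide_eq_true_eq]
          exact fun hne => hne (hnz x hx))
      unfold pvCountB
      rw [hNZnil]
      simp
  · push Not at hz
    rw [pvLoopA_advance s.length s (s.length - 1) 0 0 s.length (by omega) (by omega) le_rfl
      (fun p hp hp' => hz p hp')]
    rw [pvLoopA_unfold, if_neg (lt_irrefl _)]
    have hZnil : pvZeros s = [] :=
      (List.filter_eq_nil_iff (l := List.range s.length)).mpr (fun x hx => by
        rw [List.mem_range] at hx
        simp only [decide_eq_true_eq]
        exact hz x hx)
    unfold pvCountB
    rw [hZnil]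
    simp

lemma pvMain_aux : ∀ (N : Nat) (s : List Char), pvMu s < N →
    pvLoopA s (s.length - 1) 0 0 = pvCountB s := by
  intro N
  induction N with
  | zero => intro s h; omega
  | succ N ih =>
    intro s h
    exact pvMain_step s (fun s₂ hlt => ih s₂ (by omega))

lemma pvMain (s : List Char) : pvLoopA s (s.length - 1) 0 0 = pvCountB s :=
  pvMain_aux (pvMu s + 1) s (by omega)

-- ===== VERDICT (by name: the statement is the Claim_ definition above) =====
theorem maximizeNumberRoundness_spec : Claim_equal_maximizeNumberRoundness := by
  intro n _
  unfold Spec_maximizeNumberRoundness maximizeNumberRoundness maximizeNumberRoundness_alt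
  exact pvMain _
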